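-- pv_equiv track=rewrite | github.com/jean-melendez/CCOM5050-Algorithms | DC_ODD.py | DC_ODD
-- ===== SOURCE A (Python) =====
-- def DC_ODD(A, p, q):
-- 	m = (p + q)//2
-- 	odd_pos = 0
-- 	if (p == q):
-- 		if (A[p] >= 0 and A[p] % 2 == 1):
-- 			odd_pos = odd_pos + 1
-- 			return odd_pos
-- 		else:
-- 			return 0
-- 	result = DC_ODD(A,p,m) + DC_ODD(A, m + 1, q)
-- 	return result
-- ===== SOURCE B (Python) =====
-- def _is_pos_odd(x):
--     return x >= 0 and x % 2 == 1
--
-- def DC_ODD(A, p, q):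
--     count = 0
--     i = q
--     while True:
--         if _is_pos_odd(A[i]):
--             count += 1
--         if i == p:
--             return count
--         i -= 1
-- ===== Notes on version B (the rewrite author's own statement) =====
-- stated objective: simpler
-- what changed: Replaces the divide-and-conquer midpoint recursion (two recursive calls around m = (p+q)//2) with a flat iterative scan that walks i from q down to p with a counter, testing each element via a small predicate helper; no recursion and no midpoint arithmetic.
import Mathlib
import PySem

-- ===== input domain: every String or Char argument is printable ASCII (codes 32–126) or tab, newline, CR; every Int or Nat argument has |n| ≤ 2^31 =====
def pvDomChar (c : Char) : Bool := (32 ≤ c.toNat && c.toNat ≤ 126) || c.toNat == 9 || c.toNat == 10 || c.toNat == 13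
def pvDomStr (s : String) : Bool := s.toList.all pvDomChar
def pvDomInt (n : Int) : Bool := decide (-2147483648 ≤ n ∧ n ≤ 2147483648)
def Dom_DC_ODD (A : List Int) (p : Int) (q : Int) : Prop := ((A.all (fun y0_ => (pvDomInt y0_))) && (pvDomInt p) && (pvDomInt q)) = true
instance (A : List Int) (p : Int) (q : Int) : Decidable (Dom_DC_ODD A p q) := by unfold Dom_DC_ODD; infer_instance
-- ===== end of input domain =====

-- B replaces A's divide-and-conquer midpoint recursion by a flat iterative scan from q down to p
-- with a counter and a predicate helper; objective: simpler.

-- ===== PORT A =====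
-- fuel recursion: the fuel only makes the recursion total in Lean; with p ≤ q it never runs out.
def DC_ODD_go (fuel : Nat) (A : List Int) (p : Int) (q : Int) : Int :=
  match fuel with
  | 0 => 0
  | fuel + 1 =>
    let m := PySem.Int.floordiv (p + q) 2
    if p = q then
      if 0 ≤ PySem.List.pyGetD A p 0 ∧ PySem.Int.mod (PySem.List.pyGetD A p 0) 2 = 1 then
        (0 : Int) + 1
      else 0
    else DC_ODD_go fuel A p m + DC_ODD_go fuel A (m + 1) q

def DC_ODD (A : List Int) (p : Int) (q : Int) : Int :=
  DC_ODD_go ((q - p).toNat + 1) A p q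

-- ===== PORT B =====
-- Source B's helper _is_pos_odd(x)
def isPosOdd (x : Int) : Bool := decide (0 ≤ x ∧ PySem.Int.mod x 2 = 1)

-- Source B's 'while True' loop: one iteration per i = q, q-1, …, returning count when i = p
-- (the fuel only makes the loop total in Lean; with p ≤ q it never runs out).
def DC_ODD_altGo (fuel : Nat) (A : List Int) (p : Int) (i : Int) (count : Int) : Int :=
  match fuel with
  | 0 => count
  | fuel + 1 =>
    let c := if isPosOdd (PySem.List.pyGetD A i 0) then count + 1 else count
    if i = p then c else DC_ODD_altGo fuel A p (i - 1) c

def DC_ODD_alt (A : List Int) (p : Int) (q : Int) : Int :=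
  DC_ODD_altGo ((q - p).toNat + 1) A p q 0

-- ===== PRECONDITION & SPEC =====
-- Pre_ is exactly where Python A returns: p ≤ q (otherwise the recursion never bottoms out and
-- raises RecursionError) and every index in [p, q] is a valid Python index (-len ≤ p, q < len).
def Pre_DC_ODD (A : List Int) (p : Int) (q : Int) : Prop :=
  p ≤ q ∧ -(A.length : Int) ≤ p ∧ q < (A.length : Int)
instance (A : List Int) (p : Int) (q : Int) : Decidable (Pre_DC_ODD A p q) := by
  unfold Pre_DC_ODD; infer_instance

def pvWitness_DC_ODD : List Int × Int × Int := ([3, -2, 5, 4], 0, 3)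

def Spec_DC_ODD (A : List Int) (p : Int) (q : Int) (out : Int) : Prop := out = DC_ODD_alt A p q
instance (A : List Int) (p : Int) (q : Int) (out : Int) : Decidable (Spec_DC_ODD A p q out) := by
  unfold Spec_DC_ODD; infer_instance

-- ===== CLAIM (what is proved, stated in full; the proofs are below) =====
def Claim_equal_DC_ODD : Prop := ∀ (A : List Int) (p : Int) (q : Int),
  Dom_DC_ODD A p q → Pre_DC_ODD A p q → Spec_DC_ODD A p q (DC_ODD A p q)

-- ===== LEMMAS AND PROOFS =====

-- proof-only characterisation: the number of odd non-negative elements at indices p…q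
def cntOdd (A : List Int) (p : Int) (q : Int) : Int :=
  (((PySem.List.pyRange p (q + 1) 1).filter
      (fun i => decide (0 ≤ PySem.List.pyGetD A i 0 ∧
        PySem.Int.mod (PySem.List.pyGetD A i 0) 2 = 1))).length : Int)

-- cntOdd splits at any midpoint m with p ≤ m + 1 ≤ q + 1
theorem cnt_split (A : List Int) (p m q : Int) (h1 : p ≤ m + 1) (h2 : m ≤ q) :
    cntOdd A p q = cntOdd A p m + cntOdd A (m + 1) q := by
  unfold cntOdd
  rw [PySem.List.pyRange_one_append p (m + 1) (q + 1) h1 (by omega), List.filter_append,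
    List.length_append]
  push_cast
  ring

theorem cnt_singleton (A : List Int) (p : Int) :
    cntOdd A p p = if 0 ≤ PySem.List.pyGetD A p 0 ∧ PySem.Int.mod (PySem.List.pyGetD A p 0) 2 = 1
      then 1 else 0 := by
  unfold cntOdd
  rw [PySem.List.pyRange_one_singleton, List.filter_singleton]
  by_cases h1 : 0 ≤ PySem.List.pyGetD A p 0 <;>
    by_cases h2 : (PySem.List.pyGetD A p 0).fmod 2 = 1 <;>
      simp [PySem.Int.mod, h1, h2]

theorem go_eq_cnt : ∀ (fuel : Nat) (A : List Int) (p q : Int),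
    p ≤ q → (q - p).toNat < fuel → DC_ODD_go fuel A p q = cntOdd A p q := by
  intro fuel
  induction fuel with
  | zero => intro A p q _ h; omega
  | succ fuel ih =>
    intro A p q hpq hf
    by_cases heq : p = q
    · subst heq
      simp only [DC_ODD_go]
      rw [cnt_singleton]
      by_cases h : 0 ≤ PySem.List.pyGetD A p 0 ∧ PySem.Int.mod (PySem.List.pyGetD A p 0) 2 = 1 <;>
        simp [h]
    · have hlt : p < q := lt_of_le_of_ne hpq heq
      have hm : PySem.Int.floordiv (p + q) 2 = (p + q) / 2 :=
        PySem.Int.floordiv_eq_ediv_of_pos (by omega)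
      have hmb : p ≤ (p + q) / 2 ∧ (p + q) / 2 < q := by omega
      simp only [DC_ODD_go, if_neg heq]
      rw [hm, ih A p ((p + q) / 2) (by omega) (by omega),
        ih A ((p + q) / 2 + 1) q (by omega) (by omega),
        ← cnt_split A p ((p + q) / 2) q (by omega) (by omega)]

theorem altGo_eq_cnt : ∀ (fuel : Nat) (A : List Int) (p i c : Int),
    p ≤ i → (i - p).toNat < fuel → DC_ODD_altGo fuel A p i c = c + cntOdd A p i := by
  intro fuel
  induction fuel with
  | zero => intro A p i c _ h; omega
  | succ fuel ih =>
    intro A p i c hpi hf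
    have hc : (if isPosOdd (PySem.List.pyGetD A i 0) then c + 1 else c) = c + cntOdd A i i := by
      rw [cnt_singleton]
      simp only [isPosOdd, decide_eq_true_eq]
      split_ifs <;> ring
    by_cases heq : i = p
    · subst heq
      simp only [DC_ODD_altGo]
      rw [hc]
      simp
    · simp only [DC_ODD_altGo, if_neg heq]
      rw [ih A p (i - 1) _ (by omega) (by omega), hc,
        cnt_split A p (i - 1) i (by omega) (by omega)]
      have : i - 1 + 1 = i := by ring
      rw [this]
      ring

-- ===== VERDICT (by name: the statement is the Claim_ definition above) =====
theorem DC_ODD_spec : Claim_equal_DC_ODD := by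
  intro A p q _ hpre
  unfold Spec_DC_ODD DC_ODD DC_ODD_alt
  rw [go_eq_cnt _ A p q hpre.1 (by omega), altGo_eq_cnt _ A p q 0 hpre.1 (by omega)]
  ring
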